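-- pv_equiv track=rewrite | github.com/GraceCampbell/advent-of-code | advent_2025/day4/code.py | part_one
-- ===== SOURCE A (Python) =====
-- from itertools import product
--
-- def part_one(puzzle_input):
--     grid = [list(x) for x in puzzle_input]
--     cols = len(grid[0])
--     rows = len(grid)
--
--     accessible_rolls = 0
--
--     for i in range(rows):
--         for j in range(cols):
--             if grid[i][j] == '@':
--                 found_accessible_rolls, new_grid = find_accessible_rolls(grid, i, j)
--                 accessible_rolls += found_accessible_rolls
--
--     return accessible_rolls
--
-- def find_accessible_rolls(grid, i, j, remove=False):
--     cols = len(grid[0])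
--     rows = len(grid)
--     adjacent = 0
--     for combo in product([-1, 0, 1], [-1, 0, 1]):
--         if combo == (0, 0):
--             pass
--         else:
--             i_val = i + combo[0]
--             j_val = j + combo[1]
--             if i_val == rows or j_val == cols or i_val == -1 or j_val == -1:
--                 pass
--             elif grid[i_val][j_val] == '@':
--                 adjacent += 1
--     if adjacent < 4:
--         if remove:
--             grid[i][j] = '.'
--         return 1, grid
--     else:
--         return 0, grid
-- ===== SOURCE B (Python) =====
-- def part_one(puzzle_input):
--     grid = [list(x) for x in puzzle_input]
--     cols = len(grid[0])
--     rows = len(grid)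
--
--     counts = {}
--     coords = []
--     for i in range(rows):
--         for j in range(cols):
--             if grid[i][j] == '@':
--                 coords.append((i, j))
--                 for n in [(i + di, j + dj)
--                           for di in (-1, 0, 1) for dj in (-1, 0, 1)
--                           if di != 0 or dj != 0]:
--                     if 0 <= n[0] < rows and 0 <= n[1] < cols:
--                         counts[n] = counts.get(n, 0) + 1
--
--     total = 0
--     for c in coords:
--         if counts.get(c, 0) < 4:
--             total += 1
--     return total
-- ===== Notes on version B (the rewrite author's own statement) =====
-- stated objective: alternative
-- what changed: A gathers: for every '@' cell it re-scans all 8 neighbours via find_accessible_rolls; B makes one pass that scatters +1 contributions from each '@' cell into a neighbour-count dictionary and a coordinate list, then counts the recorded coordinates whose tallied count is below 4.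
import Mathlib
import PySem

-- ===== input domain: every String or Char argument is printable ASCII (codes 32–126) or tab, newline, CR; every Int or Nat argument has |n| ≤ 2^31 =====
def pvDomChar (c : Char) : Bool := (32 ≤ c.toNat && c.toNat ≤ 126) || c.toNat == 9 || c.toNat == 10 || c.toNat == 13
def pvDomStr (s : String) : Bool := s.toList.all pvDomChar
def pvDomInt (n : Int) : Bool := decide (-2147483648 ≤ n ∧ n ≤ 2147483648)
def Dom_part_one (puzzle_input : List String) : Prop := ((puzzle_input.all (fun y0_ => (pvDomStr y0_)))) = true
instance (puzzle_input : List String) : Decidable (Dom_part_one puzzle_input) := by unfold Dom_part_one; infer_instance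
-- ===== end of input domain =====

-- B replaces A's per-'@' gather (re-scanning the 8 neighbours of every '@') by one pass that
-- scatters +1 contributions of each '@' into a neighbour-count dictionary, then counts the
-- recorded '@' coordinates whose tallied count is < 4 (objective: alternative decomposition).

-- ===== PORT A =====
-- itertools.product([-1, 0, 1], [-1, 0, 1]) as a literal list
def pvOffsets9 : List (Int × Int) :=
  [(-1,-1),(-1,0),(-1,1),(0,-1),(0,0),(0,1),(1,-1),(1,0),(1,1)]

def find_accessible_rolls (grid : List (List Char)) (i j : Int) (remove : Bool) :
    Int × List (List Char) :=
  let cols : Int := PySem.List.len (PySem.List.pyGetD grid 0 [])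
  let rows : Int := PySem.List.len grid
  let adjacent : Int := pvOffsets9.foldl (fun adjacent combo =>
    if combo = ((0 : Int), (0 : Int)) then adjacent
    else
      let i_val := i + combo.1
      let j_val := j + combo.2
      if i_val = rows ∨ j_val = cols ∨ i_val = -1 ∨ j_val = -1 then adjacent
      else if PySem.List.pyGetD (PySem.List.pyGetD grid i_val []) j_val ' ' = '@' then
        adjacent + 1
      else adjacent) 0
  if adjacent < 4 then
    if remove then
      (1, PySem.List.pySetD grid i (PySem.List.pySetD (PySem.List.pyGetD grid i []) j '.'))
    else (1, grid)
  else (0, grid)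

def part_one (puzzle_input : List String) : Int :=
  let grid := puzzle_input.map String.toList
  let cols : Int := PySem.List.len (PySem.List.pyGetD grid 0 [])
  let rows : Int := PySem.List.len grid
  (PySem.List.pyRange 0 rows 1).foldl (fun acc i =>
    (PySem.List.pyRange 0 cols 1).foldl (fun acc j =>
      if PySem.List.pyGetD (PySem.List.pyGetD grid i []) j ' ' = '@' then
        acc + (find_accessible_rolls grid i j false).1
      else acc) acc) 0

-- ===== PORT B =====
-- the 8 neighbour offsets [(i+di, j+dj) for di in (-1,0,1) for dj in (-1,0,1) if di != 0 or dj != 0]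
def pvOffsets8 : List (Int × Int) :=
  [(-1,-1),(-1,0),(-1,1),(0,-1),(0,1),(1,-1),(1,0),(1,1)]

def part_one_alt (puzzle_input : List String) : Int :=
  let grid := puzzle_input.map String.toList
  let cols : Int := PySem.List.len (PySem.List.pyGetD grid 0 [])
  let rows : Int := PySem.List.len grid
  let st := (PySem.List.pyRange 0 rows 1).foldl (fun st i =>
    (PySem.List.pyRange 0 cols 1).foldl (fun st j =>
      if PySem.List.pyGetD (PySem.List.pyGetD grid i []) j ' ' = '@' then
        ((pvOffsets8.map (fun d => (i + d.1, j + d.2))).foldl (fun counts n =>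
            if 0 ≤ n.1 ∧ n.1 < rows ∧ 0 ≤ n.2 ∧ n.2 < cols then
              counts.modify n 0 (· + 1)
            else counts) st.1,
         st.2 ++ [(i, j)])
      else st) st)
    ((PySem.Dict.empty : PySem.Dict (Int × Int) Int), ([] : List (Int × Int)))
  st.2.foldl (fun total c => if st.1.getD c 0 < 4 then total + 1 else total) 0

-- ===== PRECONDITION & SPEC =====
-- Pre_ excludes exactly the inputs on which A raises IndexError: the empty list (grid[0]),
-- and ragged inputs where some row is shorter than the first row (grid[i][j] in the main loop).
def Pre_part_one (puzzle_input : List String) : Prop :=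
  puzzle_input ≠ [] ∧ ∀ s ∈ puzzle_input, (puzzle_input.headD "").length ≤ s.length
instance (puzzle_input : List String) : Decidable (Pre_part_one puzzle_input) := by
  unfold Pre_part_one; infer_instance
def pvWitness_part_one : List String := ["@@.", ".@@", "@.@"]

def Spec_part_one (puzzle_input : List String) (out : Int) : Prop := out = part_one_alt puzzle_input
instance (puzzle_input : List String) (out : Int) : Decidable (Spec_part_one puzzle_input out) := by unfold Spec_part_one; infer_instance

-- ===== CLAIM (what is proved, stated in full; the proofs are below) =====
def Claim_equal_part_one : Prop := ∀ (puzzle_input : List String), Dom_part_one puzzle_input → Pre_part_one puzzle_input → Spec_part_one puzzle_input (part_one puzzle_input)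

-- ===== LEMMAS AND PROOFS =====

-- helper notions used only by the proofs
abbrev pvAtP (grid : List (List Char)) (c : Int × Int) : Prop :=
  PySem.List.pyGetD (PySem.List.pyGetD grid c.1 []) c.2 ' ' = '@'

abbrev pvInbP (rows cols : Int) (p : Int × Int) : Prop :=
  0 ≤ p.1 ∧ p.1 < rows ∧ 0 ≤ p.2 ∧ p.2 < cols

def pvCells (rows cols : Int) : List (Int × Int) :=
  (PySem.List.pyRange 0 rows 1).flatMap
    (fun i => (PySem.List.pyRange 0 cols 1).map (fun j => (i, j)))

def pvNb (c : Int × Int) : List (Int × Int) :=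
  pvOffsets8.map (fun d => (c.1 + d.1, c.2 + d.2))

-- the true neighbour count of a cell
def pvAdj (grid : List (List Char)) (rows cols : Int) (c : Int × Int) : Nat :=
  ((pvNb c).filter (fun p => decide (pvInbP rows cols p ∧ pvAtP grid p))).length

lemma pvMem_offs8 (d : Int × Int) :
    d ∈ pvOffsets8 ↔ (-1 ≤ d.1 ∧ d.1 ≤ 1 ∧ -1 ≤ d.2 ∧ d.2 ≤ 1 ∧ d ≠ (0, 0)) := by
  obtain ⟨a, b⟩ := d
  simp [pvOffsets8, Prod.ext_iff]
  omega

lemma pvMem_nb (c p : Int × Int) :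
    p ∈ pvNb c ↔ (-1 ≤ p.1 - c.1 ∧ p.1 - c.1 ≤ 1 ∧ -1 ≤ p.2 - c.2 ∧ p.2 - c.2 ≤ 1 ∧ p ≠ c) := by
  have aux : p ∈ pvNb c ↔ (p.1 - c.1, p.2 - c.2) ∈ pvOffsets8 := by
    simp only [pvNb, List.mem_map]
    constructor
    · rintro ⟨d, hd, rfl⟩; simpa using hd
    · intro h; exact ⟨_, h, by simp⟩
  rw [aux, pvMem_offs8]
  obtain ⟨px, py⟩ := p; obtain ⟨cx, cy⟩ := c
  simp [Prod.ext_iff]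
  omega

lemma pvMem_cells (rows cols : Int) (p : Int × Int) :
    p ∈ pvCells rows cols ↔ pvInbP rows cols p := by
  obtain ⟨px, py⟩ := p
  simp only [pvCells, List.mem_flatMap, List.mem_map, PySem.List.mem_pyRange_one, pvInbP]
  constructor
  · rintro ⟨i, hi, j, hj, h⟩
    obtain ⟨rfl, rfl⟩ := Prod.mk.injEq .. |>.mp h
    exact ⟨hi.1, hi.2, hj.1, hj.2⟩
  · rintro ⟨h1, h2, h3, h4⟩
    exact ⟨px, ⟨h1, h2⟩, py, ⟨h3, h4⟩, rfl⟩

lemma pvNodup_cells (rows cols : Int) : (pvCells rows cols).Nodup := by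
  have h : pvCells rows cols =
      (PySem.List.pyRange 0 rows 1).product (PySem.List.pyRange 0 cols 1) := rfl
  rw [h]
  exact List.Nodup.product (PySem.List.nodup_pyRange_one 0 rows) (PySem.List.nodup_pyRange_one 0 cols)

lemma pvNodup_nb (c : Int × Int) : (pvNb c).Nodup := by
  apply List.Nodup.map
  · intro a b hab
    obtain ⟨a1, a2⟩ := a; obtain ⟨b1, b2⟩ := b
    simp only [Prod.ext_iff] at hab ⊢
    omega
  · decide

lemma pvOff9_bounds (d : Int × Int) (hd : d ∈ pvOffsets9) :
    -1 ≤ d.1 ∧ d.1 ≤ 1 ∧ -1 ≤ d.2 ∧ d.2 ≤ 1 := by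
  obtain ⟨a, b⟩ := d
  simp [pvOffsets9, Prod.ext_iff] at hd
  omega

-- A's inner gather equals the true neighbour count (for an in-bounds cell)
lemma pvFindA (grid : List (List Char)) (c : Int × Int)
    (h : pvInbP (PySem.List.len grid) (PySem.List.len (PySem.List.pyGetD grid 0 [])) c) :
    (find_accessible_rolls grid c.1 c.2 false).1 =
      if (pvAdj grid (PySem.List.len grid) (PySem.List.len (PySem.List.pyGetD grid 0 [])) c : Int) < 4
      then 1 else 0 := by
  obtain ⟨i, j⟩ := c
  set cols := PySem.List.len (PySem.List.pyGetD grid 0 []) with hcols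
  set rows := PySem.List.len grid with hrows
  simp only [find_accessible_rolls]
  have hbody : ∀ d ∈ pvOffsets9, ∀ acc : Int,
      (if d = ((0 : Int), (0 : Int)) then acc
       else if i + d.1 = rows ∨ j + d.2 = cols ∨ i + d.1 = -1 ∨ j + d.2 = -1 then acc
       else if PySem.List.pyGetD (PySem.List.pyGetD grid (i + d.1) []) (j + d.2) ' ' = '@' then
         acc + 1
       else acc)
      = if (pvInbP rows cols (i + d.1, j + d.2) ∧ pvAtP grid (i + d.1, j + d.2) ∧ d ≠ (0, 0))
        then acc + 1 else acc := by
    intro d hd acc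
    obtain ⟨hb1, hb2, hb3, hb4⟩ := pvOff9_bounds d hd
    obtain ⟨hi1, hi2, hj1, hj2⟩ := h
    by_cases h0 : d = ((0 : Int), (0 : Int))
    · simp [h0]
    · by_cases hbd : i + d.1 = rows ∨ j + d.2 = cols ∨ i + d.1 = -1 ∨ j + d.2 = -1
      · have hni : ¬ pvInbP rows cols (i + d.1, j + d.2) := by
          simp only [pvInbP]; omega
        simp [h0, hbd, hni]
      · have hinb : pvInbP rows cols (i + d.1, j + d.2) := by
          simp only [pvInbP]; omega
        by_cases hat : pvAtP grid (i + d.1, j + d.2)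
        · have hat' : PySem.List.pyGetD (PySem.List.pyGetD grid (i + d.1) []) (j + d.2) ' ' = '@' := hat
          simp [h0, hbd, hat', hinb]
        · have hat' : ¬ PySem.List.pyGetD (PySem.List.pyGetD grid (i + d.1) []) (j + d.2) ' ' = '@' := hat
          simp [h0, hbd, hat']
  rw [PySem.List.foldl_congr_mem' _ _ _ _ hbody, PySem.List.foldl_ite_add_one, zero_add]
  have hcount : List.countP
      (fun d => decide (pvInbP rows cols (i + d.1, j + d.2) ∧ pvAtP grid (i + d.1, j + d.2) ∧ d ≠ (0, 0)))
      pvOffsets9 = pvAdj grid rows cols (i, j) := by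
    have h9 : pvOffsets9 = [((-1 : Int), (-1 : Int)), (-1, 0), (-1, 1), (0, -1)] ++
        (0, 0) :: [(0, 1), (1, -1), (1, 0), (1, 1)] := rfl
    have h8 : pvOffsets8 = [((-1 : Int), (-1 : Int)), (-1, 0), (-1, 1), (0, -1)] ++
        [(0, 1), (1, -1), (1, 0), (1, 1)] := rfl
    unfold pvAdj
    rw [← List.countP_eq_length_filter]
    have hnb : pvNb (i, j) = pvOffsets8.map (fun d => (i + d.1, j + d.2)) := rfl
    rw [hnb, List.countP_map, h9, h8]
    simp only [List.countP_append, List.countP_cons, List.countP_nil, Function.comp]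
    norm_num [Prod.ext_iff]
  rw [hcount]
  simp
  split_ifs <;> rfl

-- A as a countP over the '@' cells
lemma pvA_eq (puzzle_input : List String) :
    part_one puzzle_input =
    (((pvCells (PySem.List.len (puzzle_input.map String.toList))
        (PySem.List.len (PySem.List.pyGetD (puzzle_input.map String.toList) 0 []))).filter
          (fun c => decide (pvAtP (puzzle_input.map String.toList) c))).countP
      (fun c => decide ((pvAdj (puzzle_input.map String.toList)
        (PySem.List.len (puzzle_input.map String.toList))
        (PySem.List.len (PySem.List.pyGetD (puzzle_input.map String.toList) 0 [])) c : Int) < 4)) : Int) := by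
  simp only [part_one]
  set grid := puzzle_input.map String.toList with hg
  set cols := PySem.List.len (PySem.List.pyGetD grid 0 []) with hcols
  set rows := PySem.List.len grid with hrows
  have h1 : ∀ i ∈ PySem.List.pyRange 0 rows 1, ∀ acc : Int,
      (PySem.List.pyRange 0 cols 1).foldl (fun acc j =>
        if PySem.List.pyGetD (PySem.List.pyGetD grid i []) j ' ' = '@' then
          acc + (find_accessible_rolls grid i j false).1
        else acc) acc
      = ((PySem.List.pyRange 0 cols 1).map (fun j => (i, j))).foldl (fun acc c =>
          if pvAtP grid c then acc + (find_accessible_rolls grid c.1 c.2 false).1 else acc) acc := by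
    intro i _ acc
    rw [List.foldl_map]
  rw [PySem.List.foldl_congr_mem' _ _ _ _ h1, ← List.foldl_flatMap]
  have hcl : ((PySem.List.pyRange 0 rows 1).flatMap
      (fun i => (PySem.List.pyRange 0 cols 1).map (fun j => (i, j)))) = pvCells rows cols := rfl
  rw [hcl, PySem.List.foldl_ite_eq_foldl_filter (pvAtP grid)
    (fun acc c => acc + (find_accessible_rolls grid c.1 c.2 false).1),
    PySem.List.foldl_add, zero_add]
  have hmap : ∀ c ∈ (pvCells rows cols).filter (fun c => decide (pvAtP grid c)),
      (find_accessible_rolls grid c.1 c.2 false).1 =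
      if (fun c => decide ((pvAdj grid rows cols c : Int) < 4)) c = true then 1 else 0 := by
    intro c hc
    have hin : pvInbP rows cols c :=
      (pvMem_cells rows cols c).mp (List.mem_filter.mp hc).1
    rw [pvFindA grid c hin, hrows, hcols]
    simp [PySem.List.len_eq]
  rw [List.map_congr_left hmap, PySem.List.sum_map_ite_one_zero]

-- the multiset of scattered keys
def pvKeys (grid : List (List Char)) (rows cols : Int) : List (Int × Int) :=
  ((pvCells rows cols).filter (fun c => decide (pvAtP grid c))).flatMap
    (fun c => (pvNb c).filter (fun p => decide (pvInbP rows cols p)))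

-- B as a countP over the same '@' cells
set_option maxHeartbeats 1000000 in
lemma pvB_eq (puzzle_input : List String) :
    part_one_alt puzzle_input =
    (((pvCells (PySem.List.len (puzzle_input.map String.toList))
        (PySem.List.len (PySem.List.pyGetD (puzzle_input.map String.toList) 0 []))).filter
          (fun c => decide (pvAtP (puzzle_input.map String.toList) c))).countP
      (fun c => decide (((pvKeys (puzzle_input.map String.toList)
        (PySem.List.len (puzzle_input.map String.toList))
        (PySem.List.len (PySem.List.pyGetD (puzzle_input.map String.toList) 0 []))).count c : Int) < 4)) : Int) := by
  simp only [part_one_alt]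
  set grid := puzzle_input.map String.toList with hg
  set cols := PySem.List.len (PySem.List.pyGetD grid 0 []) with hcols
  set rows := PySem.List.len grid with hrows
  have h1 : ∀ i ∈ PySem.List.pyRange 0 rows 1,
      ∀ st : PySem.Dict (Int × Int) Int × List (Int × Int),
      (PySem.List.pyRange 0 cols 1).foldl (fun st j =>
        if PySem.List.pyGetD (PySem.List.pyGetD grid i []) j ' ' = '@' then
          ((pvOffsets8.map (fun d => (i + d.1, j + d.2))).foldl (fun counts n =>
              if 0 ≤ n.1 ∧ n.1 < rows ∧ 0 ≤ n.2 ∧ n.2 < cols then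
                counts.modify n 0 (· + 1)
              else counts) st.1,
           st.2 ++ [(i, j)])
        else st) st
      = ((PySem.List.pyRange 0 cols 1).map (fun j => (i, j))).foldl (fun st c =>
          if pvAtP grid c then
            ((pvNb c).foldl (fun counts n =>
                if pvInbP rows cols n then counts.modify n 0 (· + 1) else counts) st.1,
             st.2 ++ [c])
          else st) st := by
    intro i _ st
    rw [List.foldl_map]
    rfl
  rw [PySem.List.foldl_congr_mem' _ _ _ _ h1, ← List.foldl_flatMap]
  have hcl : ((PySem.List.pyRange 0 rows 1).flatMap
      (fun i => (PySem.List.pyRange 0 cols 1).map (fun j => (i, j)))) = pvCells rows cols := rfl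
  rw [hcl]
  have hstep : (fun (st : PySem.Dict (Int × Int) Int × List (Int × Int)) (c : Int × Int) =>
      if pvAtP grid c then
        ((pvNb c).foldl (fun counts n =>
            if pvInbP rows cols n then counts.modify n 0 (· + 1) else counts) st.1,
         st.2 ++ [c])
      else st)
      = (fun st c =>
        (if pvAtP grid c then
            (pvNb c).foldl (fun counts n =>
              if pvInbP rows cols n then counts.modify n 0 (· + 1) else counts) st.1
          else st.1,
         if pvAtP grid c then st.2 ++ [c] else st.2)) := by
    funext st c
    split_ifs <;> rfl
  rw [hstep, PySem.List.foldl_prod_mk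
    (f := fun (d : PySem.Dict (Int × Int) Int) (c : Int × Int) => if pvAtP grid c then
        (pvNb c).foldl (fun counts n =>
          if pvInbP rows cols n then counts.modify n 0 (· + 1) else counts) d
      else d)
    (g := fun (l : List (Int × Int)) (c : Int × Int) => if pvAtP grid c then l ++ [c] else l)]
  dsimp only
  rw [PySem.List.foldl_append_ite_eq_filter, List.nil_append,
    PySem.List.foldl_ite_eq_foldl_filter (pvAtP grid)
      (fun (d : PySem.Dict (Int × Int) Int) (c : Int × Int) =>
        (pvNb c).foldl (fun counts n =>
          if pvInbP rows cols n then counts.modify n 0 (· + 1) else counts) d)]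
  have h2 : ∀ c ∈ (pvCells rows cols).filter (fun c => decide (pvAtP grid c)),
      ∀ d : PySem.Dict (Int × Int) Int,
      (pvNb c).foldl (fun counts n =>
        if pvInbP rows cols n then counts.modify n 0 (· + 1) else counts) d
      = ((pvNb c).filter (fun p => decide (pvInbP rows cols p))).foldl
          (fun counts n => counts.modify n 0 (· + 1)) d := by
    intro c _ d
    rw [PySem.List.foldl_ite_eq_foldl_filter]
  rw [PySem.List.foldl_congr_mem' _ _ _ _ h2, ← List.foldl_flatMap]
  have hgetD : ∀ c : Int × Int,
      ((((pvCells rows cols).filter (fun c => decide (pvAtP grid c))).flatMap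
        (fun c => (pvNb c).filter (fun p => decide (pvInbP rows cols p)))).foldl
          (fun counts n => counts.modify n 0 (· + 1))
          (PySem.Dict.empty : PySem.Dict (Int × Int) Int)).getD c 0
      = ((pvKeys grid rows cols).count c : Int) := by
    intro c
    rw [PySem.Dict.getD_foldl_modify_add_one, PySem.Dict.getD_empty, zero_add]
    rfl
  rw [PySem.List.foldl_ite_add_one, zero_add]
  congr 1
  apply List.countP_congr
  intro c _
  rw [hgetD c]

-- scatter = gather: the tallied count of an '@' cell is its true neighbour count
lemma pvScatter_eq_gather (grid : List (List Char)) (rows cols : Int) (c : Int × Int)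
    (hc : pvInbP rows cols c) :
    (pvKeys grid rows cols).count c = pvAdj grid rows cols c := by
  have hsym : ∀ p : Int × Int, c ∈ pvNb p ↔ p ∈ pvNb c := by
    intro p
    rw [pvMem_nb, pvMem_nb]
    obtain ⟨a, b⟩ := p; obtain ⟨x, y⟩ := c
    simp [Prod.ext_iff]
    omega
  unfold pvKeys
  rw [List.count_flatMap]
  have h1 : ∀ c' ∈ (pvCells rows cols).filter (fun c => decide (pvAtP grid c)),
      (List.count c ∘ fun c' => (pvNb c').filter (fun p => decide (pvInbP rows cols p))) c'
      = if (fun c' => decide (c ∈ pvNb c')) c' = true then 1 else 0 := by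
    intro c' _
    simp only [Function.comp, decide_eq_true_eq]
    by_cases hm : c ∈ pvNb c'
    · have hmf : c ∈ (pvNb c').filter (fun p => decide (pvInbP rows cols p)) :=
        List.mem_filter.mpr ⟨hm, by simpa using hc⟩
      rw [List.count_eq_one_of_mem (List.Nodup.filter _ (pvNodup_nb c')) hmf, if_pos hm]
    · have hnf : c ∉ (pvNb c').filter (fun p => decide (pvInbP rows cols p)) :=
        fun h => hm (List.mem_filter.mp h).1
      rw [List.count_eq_zero_of_not_mem hnf, if_neg hm]
  rw [List.map_congr_left h1, PySem.List.sum_map_ite_one_zero_nat]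
  unfold pvAdj
  rw [List.countP_eq_length_filter]
  apply List.Perm.length_eq
  apply (List.perm_ext_iff_of_nodup _ _).mpr
  · intro x
    simp only [List.mem_filter, decide_eq_true_eq, pvMem_cells]
    constructor
    · rintro ⟨⟨hxin, hxat⟩, hxnb⟩
      exact ⟨(hsym x).mp hxnb, hxin, hxat⟩
    · rintro ⟨hxnb, hxin, hxat⟩
      exact ⟨⟨hxin, hxat⟩, (hsym x).mpr hxnb⟩
  · exact List.Nodup.filter _ (List.Nodup.filter _ (pvNodup_cells rows cols))
  · exact List.Nodup.filter _ (pvNodup_nb c)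

-- ===== VERDICT (by name: the statement is the Claim_ definition above) =====
theorem part_one_spec : Claim_equal_part_one := by
  intro puzzle_input _ _
  unfold Spec_part_one
  rw [pvA_eq, pvB_eq]
  congr 1
  apply List.countP_congr
  intro c hcmem
  have hc : pvInbP (PySem.List.len (puzzle_input.map String.toList))
      (PySem.List.len (PySem.List.pyGetD (puzzle_input.map String.toList) 0 [])) c := by
    have := (List.mem_filter.mp hcmem).1
    exact (pvMem_cells _ _ _).mp this
  rw [pvScatter_eq_gather _ _ _ _ hc]
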